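-- pv_equiv track=rewrite | github.com/gromdimon/Bioinformatics_Stronghold | 44. Reversal Distance.py | find_min_reverse
-- ===== SOURCE A (Python) =====
-- def make_reverse(sequence, start_index, end_index):
--     prefix = sequence[:start_index]
--     reversed_subsequence = sequence[start_index:end_index][::-1]
--     suffix = sequence[end_index:]
--     return prefix + reversed_subsequence + suffix
--
-- def find_breakpoints(sequence, target_sequence):
--     breakpoints = []
--     for index in range(len(sequence) - 1):
--         current_element = sequence[index]
--         adjacent_element = sequence[index + 1]
--         if abs(target_sequence.index(current_element) - target_sequence.index(adjacent_element)) != 1: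
--             # If two symbols do not follow each other
--             breakpoints.append(index + 1)
--     return breakpoints
--
-- def find_min_reverse(sequences, target_sequence):
--     # Take sequences from previous step and perform function
--     reversals = []
--     for sequence in sequences:
--         breakpoints = find_breakpoints(sequence, target_sequence)
--         for start_index_i in range(len(breakpoints) - 1):  # All possible reversals for the step
--             for end_index_i in range(start_index_i + 1, len(breakpoints)):
--                 reversals.append(make_reverse(sequence, breakpoints[start_index_i], breakpoints[end_index_i]))
--     min_bp = len(target_sequence)
--     minimum_reversals = []
--     for reversal in reversals:  # Choosing reversals with minimum breakpoints
--         num_breakpoints = len(find_breakpoints(reversal, target_sequence))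
--         if num_breakpoints < min_bp:
--             min_bp = num_breakpoints
--             minimum_reversals = [reversal]
--         elif num_breakpoints == min_bp:
--             minimum_reversals.append(reversal)
--     return minimum_reversals
-- ===== SOURCE B (Python) =====
-- def find_min_reverse(sequences, target_sequence):
--     # B: position dictionary of target_sequence built once (replacing repeated list.index
--     # scans), and each candidate's breakpoint count computed in O(1) from the parent
--     # sequence's count: reversing seq[b1:b2] only changes the two joint adjacencies.
--     pos = {}
--     for i, v in enumerate(target_sequence):
--         pos.setdefault(v, i)
--
--     def isbp(a, b):
--         return 1 if abs(pos[a] - pos[b]) != 1 else 0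
--
--     pairs = []
--     for seq in sequences:
--         bp = [k + 1 for k, (a, b) in enumerate(zip(seq, seq[1:]))
--               if abs(pos[a] - pos[b]) != 1]
--         base = len(bp) - 2
--         for x in range(len(bp) - 1):
--             b1 = bp[x]
--             u, w = seq[b1 - 1], seq[b1]
--             for y in range(x + 1, len(bp)):
--                 b2 = bp[y]
--                 c = base + isbp(u, seq[b2 - 1]) + isbp(w, seq[b2])
--                 pairs.append((seq[:b1] + seq[b1:b2][::-1] + seq[b2:], c))
--     if not pairs:
--         return []
--     m = min(len(target_sequence), min(c for _, c in pairs))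
--     return [r for r, c in pairs if c == m]
-- ===== Notes on version B (the rewrite author's own statement) =====
-- stated objective: faster
-- what changed: B builds a first-occurrence position dictionary of target_sequence once (replacing every repeated O(n) target_sequence.index scan), derives each candidate's breakpoint count in O(1) from its parent sequence's count (a reversal only changes the two joint adjacencies) instead of rescanning the whole candidate, and selects by a two-pass min-then-filter instead of A's running-min loop with reset.
import Mathlib
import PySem

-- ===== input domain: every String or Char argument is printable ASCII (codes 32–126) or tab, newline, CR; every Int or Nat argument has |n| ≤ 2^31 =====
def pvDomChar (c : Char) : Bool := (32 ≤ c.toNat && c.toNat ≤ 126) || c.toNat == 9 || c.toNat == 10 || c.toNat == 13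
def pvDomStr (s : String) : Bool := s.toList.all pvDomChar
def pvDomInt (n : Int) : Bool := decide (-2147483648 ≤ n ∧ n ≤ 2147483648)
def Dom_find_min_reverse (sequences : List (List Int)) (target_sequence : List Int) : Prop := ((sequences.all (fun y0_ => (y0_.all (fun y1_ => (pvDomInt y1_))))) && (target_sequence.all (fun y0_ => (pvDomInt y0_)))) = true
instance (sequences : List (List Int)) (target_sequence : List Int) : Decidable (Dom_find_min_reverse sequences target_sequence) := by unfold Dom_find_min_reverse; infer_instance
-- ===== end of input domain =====

-- B builds a first-occurrence position dictionary of target_sequence once (replacing repeated list.index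
-- scans), computes each candidate's breakpoint count in O(1) from its parent sequence's count (a reversal
-- only changes the two joint adjacencies), and selects by min-then-filter instead of A's running-min loop.


-- ===== PORT A =====
def pv_make_reverse (sequence : List Int) (start_index end_index : Int) : List Int :=
  let prefix_ := PySem.List.slice sequence none (some start_index)
  -- sequence[start:end][::-1]; step -1 never yields none, so getD [] is exact
  let reversed_subsequence := (PySem.List.slice? (PySem.List.slice sequence (some start_index) (some end_index)) none none (-1)).getD []
  let suffix := PySem.List.slice sequence (some end_index) none
  prefix_ ++ reversed_subsequence ++ suffix

-- target_sequence.index raises ValueError for a missing element (excluded by Pre_); the port defaults to 0 there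
def pv_find_breakpoints (sequence target_sequence : List Int) : List Int :=
  (PySem.List.pyRange 0 ((sequence.length : Int) - 1) 1).foldl (fun breakpoints index =>
    let current_element := (PySem.List.pyGet? sequence index).getD 0
    let adjacent_element := (PySem.List.pyGet? sequence (index + 1)).getD 0
    if ((((PySem.List.index? target_sequence current_element).getD 0 : Int)) - (((PySem.List.index? target_sequence adjacent_element).getD 0 : Int))).natAbs ≠ 1
    then breakpoints ++ [index + 1] else breakpoints) []

def find_min_reverse (sequences : List (List Int)) (target_sequence : List Int) : List (List Int) :=
  let reversals := sequences.foldl (fun reversals sequence =>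
    let breakpoints := pv_find_breakpoints sequence target_sequence
    (PySem.List.pyRange 0 ((breakpoints.length : Int) - 1) 1).foldl (fun acc start_index_i =>
      (PySem.List.pyRange (start_index_i + 1) (breakpoints.length : Int) 1).foldl (fun acc2 end_index_i =>
        acc2 ++ [pv_make_reverse sequence (PySem.List.pyGetD breakpoints start_index_i 0) (PySem.List.pyGetD breakpoints end_index_i 0)]) acc) reversals) []
  let final := reversals.foldl (fun (st : Nat × List (List Int)) reversal =>
    let num_breakpoints := (pv_find_breakpoints reversal target_sequence).length
    if num_breakpoints < st.1 then (num_breakpoints, [reversal])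
    else if num_breakpoints = st.1 then (st.1, st.2 ++ [reversal])
    else st) (target_sequence.length, [])
  final.2

-- ===== PORT B =====
-- pos = {}; for i, v in enumerate(target): pos.setdefault(v, i)
def pv_pos (target_sequence : List Int) : PySem.Dict Int Int :=
  (PySem.List.enumerate target_sequence 0).foldl (fun pos p => PySem.Dict.setdefault pos p.2 p.1) PySem.Dict.empty

-- [k+1 for k,(a,b) in enumerate(zip(seq, seq[1:])) if abs(pos[a]-pos[b]) != 1]; pos[x] (KeyError excluded by Pre_) defaults to 0
def pv_breakpoints (pos : PySem.Dict Int Int) (seq : List Int) : List Int :=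
  ((PySem.List.enumerate (seq.zip (PySem.List.slice seq (some 1) none)) 0).filter
    (fun p => (PySem.Dict.getD pos p.2.1 0 - PySem.Dict.getD pos p.2.2 0).natAbs ≠ 1)).map (fun p => p.1 + 1)

def pv_isbp (pos : PySem.Dict Int Int) (a b : Int) : Nat :=
  if (PySem.Dict.getD pos a 0 - PySem.Dict.getD pos b 0).natAbs ≠ 1 then 1 else 0

def find_min_reverse_alt (sequences : List (List Int)) (target_sequence : List Int) : List (List Int) :=
  let pos := pv_pos target_sequence
  let pairs := sequences.foldl (fun acc seq =>
    let bp := pv_breakpoints pos seq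
    let base := bp.length - 2
    acc ++ (PySem.List.pyRange 0 ((bp.length : Int) - 1) 1).flatMap (fun x =>
      let b1 := PySem.List.pyGetD bp x 0
      let u := (PySem.List.pyGet? seq (b1 - 1)).getD 0
      let w := (PySem.List.pyGet? seq b1).getD 0
      (PySem.List.pyRange (x + 1) (bp.length : Int) 1).map (fun y =>
        let b2 := PySem.List.pyGetD bp y 0
        (PySem.List.slice seq none (some b1) ++
           (PySem.List.slice? (PySem.List.slice seq (some b1) (some b2)) none none (-1)).getD [] ++
           PySem.List.slice seq (some b2) none,
         base + pv_isbp pos u ((PySem.List.pyGet? seq (b2 - 1)).getD 0)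
              + pv_isbp pos w ((PySem.List.pyGet? seq b2).getD 0))))) []
  if pairs = [] then []
  else
    let m := min target_sequence.length ((PySem.List.min? (pairs.map (fun p => p.2)) (fun c => c)).getD 0)
    (pairs.filter (fun p => p.2 = m)).map (fun p => p.1)

-- ===== PRECONDITION & SPEC =====
-- Pre_ excludes exactly the inputs where the Python A raises ValueError (list.index of an element absent
-- from target_sequence); a sequence of length < 2 performs no lookups, so only longer sequences are constrained.
def Pre_find_min_reverse (sequences : List (List Int)) (target_sequence : List Int) : Prop :=
  ∀ s ∈ sequences, 2 ≤ s.length → ∀ x ∈ s, x ∈ target_sequence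
instance (sequences : List (List Int)) (target_sequence : List Int) : Decidable (Pre_find_min_reverse sequences target_sequence) := by unfold Pre_find_min_reverse; infer_instance

def pvWitness_find_min_reverse : List (List Int) × List Int := ([[2, 1, 3], [1, 3, 2]], [1, 2, 3])

def Spec_find_min_reverse (sequences : List (List Int)) (target_sequence : List Int) (out : List (List Int)) : Prop := out = find_min_reverse_alt sequences target_sequence
instance (sequences : List (List Int)) (target_sequence : List Int) (out : List (List Int)) : Decidable (Spec_find_min_reverse sequences target_sequence out) := by unfold Spec_find_min_reverse; infer_instance

-- ===== CLAIM (what is proved, stated in full; the proofs are below) =====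
def Claim_equal_find_min_reverse : Prop := ∀ (sequences : List (List Int)) (target_sequence : List Int), Dom_find_min_reverse sequences target_sequence → Pre_find_min_reverse sequences target_sequence → Spec_find_min_reverse sequences target_sequence (find_min_reverse sequences target_sequence)

-- ===== LEMMAS AND PROOFS =====

theorem pv_pos_aux (x : Int) : ∀ (l : List Int) (s : Int) (d : PySem.Dict Int Int),
    PySem.Dict.getD ((PySem.List.enumerate l s).foldl (fun pos p => PySem.Dict.setdefault pos p.2 p.1) d) x 0
      = if d.contains x then d.getD x 0 else ((PySem.List.index? l x).map (fun k => s + (k : Int))).getD 0 := by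
  intro l
  induction l with
  | nil =>
    intro s d
    simp [PySem.List.enumerate_nil]
    by_cases h : d.contains x
    · simp [h]
    · simp [h, PySem.Dict.getD_of_not_contains d 0 (by simpa using h)]
  | cons a l ih =>
    intro s d
    rw [PySem.List.enumerate_cons]
    simp only [List.foldl_cons]
    rw [ih]
    by_cases hc : PySem.Dict.contains d x
    · have hc' : (PySem.Dict.setdefault d a s).contains x = true := by
        rw [PySem.Dict.contains_setdefault]; simp [hc]
      rw [if_pos hc', if_pos hc]
      by_cases hxa : x = a
      · subst hxa
        rw [PySem.Dict.setdefault_of_contains d s hc]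
      · rw [PySem.Dict.getD_eq_get?_getD, PySem.Dict.get?_setdefault_of_ne d s hxa, ← PySem.Dict.getD_eq_get?_getD]
    · by_cases hxa : x = a
      · subst hxa
        have hc' : (PySem.Dict.setdefault d x s).contains x = true := by
          rw [PySem.Dict.contains_setdefault]; simp
        rw [if_pos hc', if_neg (by simp [hc])]
        rw [PySem.Dict.getD_setdefault_self, PySem.Dict.getD_of_not_contains d s (by simpa using hc)]
        rw [PySem.List.index?_cons_self]
        simp
      · have hc' : (PySem.Dict.setdefault d a s).contains x = false := by
          rw [PySem.Dict.contains_setdefault]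
          simp [hc, hxa]
        rw [if_neg (by simp [hc']), if_neg (by simp [hc])]
        rw [PySem.List.index?_cons_of_ne l (fun h => hxa h.symm)]
        cases PySem.List.index? l x with
        | none => simp
        | some k => simp; ring

theorem pv_pos_getD (target : List Int) (x : Int) :
    PySem.Dict.getD (pv_pos target) x 0 = ((PySem.List.index? target x).getD 0 : Nat) := by
  unfold pv_pos
  rw [pv_pos_aux]
  cases h : PySem.List.index? target x <;> simp_all [PySem.Dict.contains_empty]

theorem breakpoints_eq (target seq : List Int) :
    pv_breakpoints (pv_pos target) seq = pv_find_breakpoints seq target := by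
  unfold pv_breakpoints pv_find_breakpoints
  rw [PySem.List.slice_from_one]
  rw [PySem.List.enumerate_eq_map_pyRange (d := (0, 0))]
  rw [List.filter_map, List.map_map]
  rw [PySem.List.foldl_append_ite
      (p := fun index => ((((PySem.List.index? target ((PySem.List.pyGet? seq index).getD 0)).getD 0 : Int))
        - (((PySem.List.index? target ((PySem.List.pyGet? seq (index + 1)).getD 0)).getD 0 : Int))).natAbs ≠ 1)
      (f := fun index => index + 1)]
  simp only [List.nil_append]
  have hr : PySem.List.pyRange 0 (PySem.List.len (seq.zip seq.tail)) 1
      = PySem.List.pyRange 0 ((seq.length : Int) - 1) 1 := by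
    rw [PySem.List.pyRange_one, PySem.List.pyRange_one]
    congr 2
    simp [PySem.List.len]
  rw [hr]
  have hfil : List.filter
      ((fun p => decide ¬(PySem.Dict.getD (pv_pos target) p.2.1 0 - PySem.Dict.getD (pv_pos target) p.2.2 0).natAbs = 1)
        ∘ fun j => (j, PySem.List.pyGetD (seq.zip seq.tail) j (0, 0)))
      (PySem.List.pyRange 0 ((seq.length : Int) - 1) 1)
    = List.filter
      (fun index => decide ¬((((PySem.List.index? target ((PySem.List.pyGet? seq index).getD 0)).getD 0 : Int))
        - (((PySem.List.index? target ((PySem.List.pyGet? seq (index + 1)).getD 0)).getD 0 : Int))).natAbs = 1)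
      (PySem.List.pyRange 0 ((seq.length : Int) - 1) 1) := by
    apply List.filter_congr
    intro j hj
    rw [PySem.List.mem_pyRange_one] at hj
    simp only [Function.comp_apply]
    have h0 : 0 ≤ j := hj.1
    have h1 : j < (seq.length : Int) - 1 := hj.2
    have hz : j < ((seq.zip seq.tail).length : Int) := by
      rw [List.length_zip, List.length_tail]
      omega
    have hzz : (seq.zip seq.tail)[j.toNat] = (seq[j.toNat]'(by omega), seq.tail[j.toNat]'(by simp [List.length_tail]; omega)) := by
      apply List.getElem_zip
    rw [PySem.List.pyGetD_eq_getElem _ _ h0 hz, hzz]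
    have ht : seq.tail[j.toNat]'(by simp [List.length_tail]; omega) = seq[j.toNat + 1]'(by omega) := by
      simp [List.getElem_tail]
    rw [PySem.List.pyGet?_eq_some_getElem seq h0 (by omega)]
    rw [PySem.List.pyGet?_eq_some_getElem seq (by omega : (0:Int) ≤ j + 1) (by omega)]
    have hj1 : (j + 1).toNat = j.toNat + 1 := by omega
    simp only [Option.getD_some, ht, hj1]
    rw [pv_pos_getD, pv_pos_getD]
  rw [hfil]
  rfl

theorem foldl_min_min (cnt : List Int → Nat) (b : Nat) : ∀ (t : List (List Int)) (c : Nat),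
    min b (t.foldl (fun m r => min m (cnt r)) c) = t.foldl (fun m r => min m (cnt r)) (min b c) := by
  intro t
  induction t with
  | nil => intro c; rfl
  | cons x t ih =>
    intro c
    simp only [List.foldl_cons]
    rw [ih (min c (cnt x))]
    congr 1
    omega

theorem sel_fold (cnt : List Int → Nat) : ∀ (rs : List (List Int)) (b : Nat) (acc : List (List Int)),
    rs.foldl (fun (st : Nat × List (List Int)) r =>
        let n := cnt r
        if n < st.1 then (n, [r]) else if n = st.1 then (st.1, st.2 ++ [r]) else st) (b, acc)
      = (rs.foldl (fun m r => min m (cnt r)) b,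
         (if rs.foldl (fun m r => min m (cnt r)) b = b then acc else []) ++
           rs.filter (fun r => cnt r = rs.foldl (fun m r => min m (cnt r)) b)) := by
  intro rs
  induction rs with
  | nil => intro b acc; simp
  | cons r rs ih =>
    intro b acc
    have hle : ∀ (l : List (List Int)) (c : Nat), l.foldl (fun m r => min m (cnt r)) c ≤ c := by
      intro l
      induction l with
      | nil => intro c; exact le_refl c
      | cons y l ihl => intro c; exact le_trans (ihl (min c (cnt y))) (by omega)
    simp only [List.foldl_cons]
    by_cases h1 : cnt r < b
    · rw [if_pos h1, ih]
      have hmin : min b (cnt r) = cnt r := by omega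
      simp only [hmin]
      have hM : rs.foldl (fun m r => min m (cnt r)) (cnt r) ≤ cnt r := hle rs (cnt r)
      have hMb : rs.foldl (fun m r => min m (cnt r)) (cnt r) ≠ b := by omega
      rw [if_neg hMb, List.filter_cons]
      by_cases h2 : cnt r = rs.foldl (fun m r => min m (cnt r)) (cnt r)
      · simp only [← h2]
        simp
      · rw [if_neg (fun hh => h2 hh.symm)]
        simp [h2]
    · by_cases h2 : cnt r = b
      · rw [if_neg h1, if_pos h2, ih]
        have hmin : min b (cnt r) = b := by omega
        simp only [hmin, List.filter_cons]
        by_cases h3 : rs.foldl (fun m r => min m (cnt r)) b = b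
        · simp [h3, h2]
        · have : ¬ (cnt r = rs.foldl (fun m r => min m (cnt r)) b) := by
            rw [h2]; exact fun hh => h3 hh.symm
          simp [h3, this]
      · rw [if_neg h1, if_neg h2, ih]
        have hmin : min b (cnt r) = b := by omega
        simp only [hmin, List.filter_cons]
        have hM : rs.foldl (fun m r => min m (cnt r)) b ≤ b := hle rs b
        have : ¬ (cnt r = rs.foldl (fun m r => min m (cnt r)) b) := by omega
        simp [this]

-- predicate "the two elements are not adjacent in target" as A computes it
def pvQ (target : List Int) (a b : Int) : Bool :=
  decide (((((PySem.List.index? target a).getD 0 : Int)) - (((PySem.List.index? target b).getD 0 : Int))).natAbs ≠ 1)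

theorem pvQ_symm (target : List Int) (a b : Int) : pvQ target a b = pvQ target b a := by
  simp only [pvQ, decide_eq_decide]
  omega

theorem len_filter_enumerate (f : Int × Int → Bool) : ∀ (l : List (Int × Int)) (s : Int),
    ((PySem.List.enumerate l s).filter (fun p => f p.2)).length = l.countP f := by
  intro l
  induction l with
  | nil => intro s; simp [PySem.List.enumerate_nil]
  | cons a l ih =>
    intro s
    rw [PySem.List.enumerate_cons, List.filter_cons, List.countP_cons]
    by_cases h : f a
    · simp [h, ih]
    · simp [h, ih]

theorem cnt_eq (target r : List Int) :
    (pv_find_breakpoints r target).length = (r.zip r.tail).countP (fun p => pvQ target p.1 p.2) := by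
  rw [← breakpoints_eq]
  unfold pv_breakpoints
  rw [List.length_map, PySem.List.slice_from_one]
  have hf : (fun (p : Int × (Int × Int)) => decide ((PySem.Dict.getD (pv_pos target) p.2.1 0 - PySem.Dict.getD (pv_pos target) p.2.2 0).natAbs ≠ 1))
      = fun (p : Int × (Int × Int)) => pvQ target p.2.1 p.2.2 := by
    funext p
    rw [pv_pos_getD, pv_pos_getD]
    rfl
  rw [hf, len_filter_enumerate (fun p => pvQ target p.1 p.2)]

theorem countP_pz_append (q : Int × Int → Bool) : ∀ (xs ys : List Int), xs ≠ [] → ys ≠ [] →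
    ((xs ++ ys).zip (xs ++ ys).tail).countP q
      = (xs.zip xs.tail).countP q + (if q (xs.getLastD 0, ys.headD 0) then 1 else 0)
        + (ys.zip ys.tail).countP q := by
  intro xs
  induction xs with
  | nil => intro ys h; exact absurd rfl h
  | cons a xs ih =>
    intro ys _ hy
    cases xs with
    | nil =>
      cases ys with
      | nil => exact absurd rfl hy
      | cons h t =>
        simp [List.countP_cons]
        omega
    | cons b xs' =>
      have := ih ys (by simp) hy
      simp only [List.cons_append, List.tail_cons] at this ⊢
      simp only [List.zip_cons_cons, List.countP_cons, this, List.getLastD_cons]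
      omega

theorem countP_pz_reverse (target : List Int) : ∀ (l : List Int),
    (l.reverse.zip l.reverse.tail).countP (fun p => pvQ target p.1 p.2)
      = (l.zip l.tail).countP (fun p => pvQ target p.1 p.2) := by
  intro l
  induction l with
  | nil => rfl
  | cons a l ih =>
    cases l with
    | nil => rfl
    | cons b t =>
      rw [List.reverse_cons]
      rw [countP_pz_append _ (b :: t).reverse [a] (by simp) (by simp)]
      simp only [List.headD_cons, ih]
      simp only [List.tail_cons, List.zip_cons_cons, List.countP_cons, List.zip_nil_right,
        List.countP_nil]
      have hlast : (b :: t).reverse.getLastD 0 = b := by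
        simp [List.getLastD_eq_getLast?, List.getLast?_reverse]
      rw [hlast]
      have hq : pvQ target b a = pvQ target a b := pvQ_symm target b a
      by_cases h : pvQ target a b
      · simp [h, hq]
      · simp [h, hq]

theorem bp_repr (seq target : List Int) :
    pv_find_breakpoints seq target
      = ((PySem.List.pyRange 0 ((seq.length : Int) - 1) 1).filter
          (fun j => pvQ target ((PySem.List.pyGet? seq j).getD 0) ((PySem.List.pyGet? seq (j+1)).getD 0))).map
          (fun j => j + 1) := by
  unfold pv_find_breakpoints
  rw [PySem.List.foldl_append_ite
      (p := fun index => ((((PySem.List.index? target ((PySem.List.pyGet? seq index).getD 0)).getD 0 : Int))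
        - (((PySem.List.index? target ((PySem.List.pyGet? seq (index + 1)).getD 0)).getD 0 : Int))).natAbs ≠ 1)
      (f := fun index => index + 1)]
  simp only [List.nil_append]
  rfl

theorem bp_mem (seq target : List Int) (b : Int) (hb : b ∈ pv_find_breakpoints seq target) :
    1 ≤ b ∧ b < (seq.length : Int) ∧
      pvQ target ((PySem.List.pyGet? seq (b - 1)).getD 0) ((PySem.List.pyGet? seq b).getD 0) = true := by
  rw [bp_repr] at hb
  obtain ⟨j, hj, rfl⟩ := List.mem_map.mp hb
  obtain ⟨hjr, hjq⟩ := List.mem_filter.mp hj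
  rw [PySem.List.mem_pyRange_one] at hjr
  refine ⟨by omega, by omega, ?_⟩
  have : j + 1 - 1 = j := by ring
  rw [this]
  exact hjq

theorem bp_sorted (seq target : List Int) : (pv_find_breakpoints seq target).Pairwise (· < ·) := by
  rw [bp_repr]
  refine List.pairwise_map.mpr ?_
  refine (List.Pairwise.filter _ (PySem.List.pairwise_lt_pyRange_one 0 ((seq.length : Int) - 1))).imp ?_
  intro a b h
  omega

theorem cnt_delta (target seq : List Int) (b1 b2 : Int)
    (h1 : b1 ∈ pv_find_breakpoints seq target) (h2 : b2 ∈ pv_find_breakpoints seq target)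
    (hlt : b1 < b2) :
    (pv_find_breakpoints (pv_make_reverse seq b1 b2) target).length
      = (pv_find_breakpoints seq target).length - 2
        + (if pvQ target ((PySem.List.pyGet? seq (b1 - 1)).getD 0) ((PySem.List.pyGet? seq (b2 - 1)).getD 0) then 1 else 0)
        + (if pvQ target ((PySem.List.pyGet? seq b1).getD 0) ((PySem.List.pyGet? seq b2).getD 0) then 1 else 0) := by
  obtain ⟨hb1l, hb1u, hq1⟩ := bp_mem seq target b1 h1
  obtain ⟨hb2l, hb2u, hq2⟩ := bp_mem seq target b2 h2
  set j1 := b1.toNat with hj1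
  set j2 := b2.toNat with hj2
  have hjj : 1 ≤ j1 ∧ j1 < j2 ∧ j2 < seq.length := by omega
  set pre := seq.take j1 with hpre
  set seg := (seq.drop j1).take (j2 - j1) with hseg
  set suf := seq.drop j2 with hsuf
  -- the element at index i, as the ports read it
  have hE : ∀ (i : Int), 0 ≤ i → i < (seq.length : Int) →
      (PySem.List.pyGet? seq i).getD 0 = seq[i.toNat]?.getD 0 := by
    intro i h0 hl
    rw [PySem.List.pyGet?_eq_some_getElem seq h0 hl]
    rw [Option.getD_some]
    have : i.toNat < seq.length := by omega
    rw [List.getElem?_eq_getElem this, Option.getD_some]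
  have hmk : pv_make_reverse seq b1 b2 = pre ++ seg.reverse ++ suf := by
    show PySem.List.slice seq none (some b1) ++
        (PySem.List.slice? (PySem.List.slice seq (some b1) (some b2)) none none (-1)).getD [] ++
        PySem.List.slice seq (some b2) none = pre ++ seg.reverse ++ suf
    rw [PySem.List.slice_to seq (by omega), PySem.List.slice_toNat seq (by omega) (by omega),
      PySem.List.slice_from seq (by omega), PySem.List.slice?_none_none_neg_one, Option.getD_some]
  have hseqdec : seq = pre ++ seg ++ suf := by
    rw [hpre, hseg, hsuf]
    conv_lhs => rw [← List.take_append_drop j1 seq]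
    rw [List.append_assoc]
    congr 1
    conv_lhs => rw [← List.take_append_drop (j2 - j1) (seq.drop j1)]
    rw [List.drop_drop]
    congr 2
    omega
  have hpre_ne : pre ≠ [] := by
    apply List.ne_nil_of_length_pos
    rw [hpre, List.length_take]
    omega
  have hseg_ne : seg ≠ [] := by
    apply List.ne_nil_of_length_pos
    rw [hseg, List.length_take, List.length_drop]
    omega
  have hsuf_ne : suf ≠ [] := by
    apply List.ne_nil_of_length_pos
    rw [hsuf, List.length_drop]
    omega
  have hrev_ne : seg.reverse ≠ [] := by
    simpa using hseg_ne
  have hpre_last : pre.getLastD 0 = (PySem.List.pyGet? seq (b1 - 1)).getD 0 := by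
    rw [hE (b1 - 1) (by omega) (by omega)]
    rw [List.getLastD_eq_getLast?, List.getLast?_eq_getElem?, hpre, List.getElem?_take,
      List.length_take]
    have h' : min j1 seq.length - 1 < j1 := by omega
    rw [if_pos h']
    have : (b1 - 1).toNat = min j1 seq.length - 1 := by omega
    rw [this]
  have hseg_head : seg.headD 0 = (PySem.List.pyGet? seq b1).getD 0 := by
    rw [hE b1 (by omega) (by omega)]
    rw [List.headD_eq_head?_getD, List.head?_eq_getElem?, hseg, List.getElem?_take,
      if_pos (by omega), List.getElem?_drop]
    congr 2
  have hseg_last : seg.getLastD 0 = (PySem.List.pyGet? seq (b2 - 1)).getD 0 := by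
    rw [hE (b2 - 1) (by omega) (by omega)]
    rw [List.getLastD_eq_getLast?, List.getLast?_eq_getElem?, hseg, List.getElem?_take,
      List.length_take, List.length_drop]
    have h' : min (j2 - j1) (seq.length - j1) - 1 < j2 - j1 := by omega
    rw [if_pos h', List.getElem?_drop]
    congr 2
    omega
  have hsuf_head : suf.headD 0 = (PySem.List.pyGet? seq b2).getD 0 := by
    rw [hE b2 (by omega) (by omega)]
    rw [List.headD_eq_head?_getD, List.head?_eq_getElem?, hsuf, List.getElem?_drop]
    congr 2
  -- decompose both counts
  have hcr : (pv_find_breakpoints (pv_make_reverse seq b1 b2) target).length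
      = ((pre.zip pre.tail).countP (fun p => pvQ target p.1 p.2)
        + (if pvQ target ((PySem.List.pyGet? seq (b1-1)).getD 0) ((PySem.List.pyGet? seq (b2-1)).getD 0) then 1 else 0)
        + ((seg.zip seg.tail).countP (fun p => pvQ target p.1 p.2)
          + (if pvQ target ((PySem.List.pyGet? seq b1).getD 0) ((PySem.List.pyGet? seq b2).getD 0) then 1 else 0)
          + (suf.zip suf.tail).countP (fun p => pvQ target p.1 p.2))) := by
    rw [cnt_eq, hmk, List.append_assoc]
    rw [countP_pz_append _ pre (seg.reverse ++ suf) hpre_ne (by simp [hrev_ne])]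
    rw [countP_pz_append _ seg.reverse suf hrev_ne hsuf_ne]
    rw [countP_pz_reverse]
    have hh1 : (seg.reverse ++ suf).headD 0 = (PySem.List.pyGet? seq (b2-1)).getD 0 := by
      rw [List.headD_eq_head?_getD, List.head?_append_of_ne_nil _ hrev_ne, List.head?_reverse,
        ← List.getLastD_eq_getLast?, hseg_last]
    have hh2 : seg.reverse.getLastD 0 = (PySem.List.pyGet? seq b1).getD 0 := by
      rw [List.getLastD_eq_getLast?, List.getLast?_reverse, ← List.headD_eq_head?_getD, hseg_head]
    rw [hh1, hh2, hpre_last, hsuf_head]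
  have hcs : (pv_find_breakpoints seq target).length
      = ((pre.zip pre.tail).countP (fun p => pvQ target p.1 p.2)
        + 1
        + ((seg.zip seg.tail).countP (fun p => pvQ target p.1 p.2)
          + 1
          + (suf.zip suf.tail).countP (fun p => pvQ target p.1 p.2))) := by
    rw [cnt_eq]
    conv_lhs => rw [hseqdec]
    rw [List.append_assoc]
    rw [countP_pz_append _ pre (seg ++ suf) hpre_ne (by simp [hseg_ne])]
    rw [countP_pz_append _ seg suf hseg_ne hsuf_ne]
    have hh1 : (seg ++ suf).headD 0 = (PySem.List.pyGet? seq b1).getD 0 := by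
      rw [List.headD_eq_head?_getD, List.head?_append_of_ne_nil _ hseg_ne,
        ← List.headD_eq_head?_getD, hseg_head]
    rw [hh1, hpre_last, hseg_last, hsuf_head, hq1, hq2]
    simp
  rw [hcr, hcs]
  omega

theorem flatMap_congr_mem {α β : Type} (l : List α) (f g : α → List β)
    (h : ∀ x ∈ l, f x = g x) : l.flatMap f = l.flatMap g := by
  induction l with
  | nil => rfl
  | cons a l ih =>
    simp only [List.flatMap_cons]
    rw [h a (by simp), ih (fun x hx => h x (by simp [hx]))]

theorem isbp_eq (target : List Int) (a b : Int) :
    pv_isbp (pv_pos target) a b = if pvQ target a b then 1 else 0 := by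
  unfold pv_isbp pvQ
  rw [pv_pos_getD, pv_pos_getD]
  simp

theorem map_pair_filter (cnt : List Int → Nat) (m : Nat) : ∀ (rs : List (List Int)),
    (((rs.map (fun r => (r, cnt r))).filter (fun p => p.2 = m)).map (fun p => p.1)) = rs.filter (fun r => cnt r = m) := by
  intro rs
  induction rs with
  | nil => rfl
  | cons r rs ih =>
    simp only [List.map_cons, List.filter_cons]
    by_cases h : cnt r = m
    · simp [h, ih]
    · simp [h, ih]

theorem gen_eq (target s : List Int) :
    (List.flatMap
      (fun x_1 =>
        List.map
          (fun y =>
            (PySem.List.slice s none (some (PySem.List.pyGetD (pv_find_breakpoints s target) x_1 0)) ++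
               (PySem.List.slice? (PySem.List.slice s (some (PySem.List.pyGetD (pv_find_breakpoints s target) x_1 0))
                   (some (PySem.List.pyGetD (pv_find_breakpoints s target) y 0))) none none (-1)).getD [] ++
               PySem.List.slice s (some (PySem.List.pyGetD (pv_find_breakpoints s target) y 0)),
             (pv_find_breakpoints s target).length - 2 +
               pv_isbp (pv_pos target) ((PySem.List.pyGet? s (PySem.List.pyGetD (pv_find_breakpoints s target) x_1 0 - 1)).getD 0)
                 ((PySem.List.pyGet? s (PySem.List.pyGetD (pv_find_breakpoints s target) y 0 - 1)).getD 0) +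
               pv_isbp (pv_pos target) ((PySem.List.pyGet? s (PySem.List.pyGetD (pv_find_breakpoints s target) x_1 0)).getD 0)
                 ((PySem.List.pyGet? s (PySem.List.pyGetD (pv_find_breakpoints s target) y 0)).getD 0)))
          (PySem.List.pyRange (x_1 + 1) ((pv_find_breakpoints s target).length : Int)))
      (PySem.List.pyRange 0 (((pv_find_breakpoints s target).length : Int) - 1)))
    = (List.flatMap
        (fun x_1 =>
          List.map
            (fun x_2 => pv_make_reverse s (PySem.List.pyGetD (pv_find_breakpoints s target) x_1 0)
              (PySem.List.pyGetD (pv_find_breakpoints s target) x_2 0))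
            (PySem.List.pyRange (x_1 + 1) ((pv_find_breakpoints s target).length : Int)))
        (PySem.List.pyRange 0 (((pv_find_breakpoints s target).length : Int) - 1))).map
        (fun r => (r, (pv_find_breakpoints r target).length)) := by
  rw [List.map_flatMap]
  apply flatMap_congr_mem
  intro x hx
  rw [List.map_map]
  apply List.map_congr_left
  intro y hy
  rw [PySem.List.mem_pyRange_one] at hx hy
  have hxl : x.toNat < (pv_find_breakpoints s target).length := by omega
  have hyl : y.toNat < (pv_find_breakpoints s target).length := by omega
  have hb1 : PySem.List.pyGetD (pv_find_breakpoints s target) x 0 = (pv_find_breakpoints s target)[x.toNat] :=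
    PySem.List.pyGetD_eq_getElem _ 0 (by omega) (by omega)
  have hb2 : PySem.List.pyGetD (pv_find_breakpoints s target) y 0 = (pv_find_breakpoints s target)[y.toNat] :=
    PySem.List.pyGetD_eq_getElem _ 0 (by omega) (by omega)
  have hm1 : (pv_find_breakpoints s target)[x.toNat] ∈ pv_find_breakpoints s target := List.getElem_mem _
  have hm2 : (pv_find_breakpoints s target)[y.toNat] ∈ pv_find_breakpoints s target := List.getElem_mem _
  have hlt : (pv_find_breakpoints s target)[x.toNat] < (pv_find_breakpoints s target)[y.toNat] :=
    (List.pairwise_iff_getElem.mp (bp_sorted s target)) _ _ hxl hyl (by omega)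
  rw [Function.comp_apply, Prod.mk.injEq]
  refine ⟨rfl, ?_⟩
  rw [isbp_eq, isbp_eq, hb1, hb2]
  rw [cnt_delta target s _ _ hm1 hm2 hlt]

theorem find_min_reverse_spec' (sequences : List (List Int)) (target : List Int) :
    find_min_reverse sequences target = find_min_reverse_alt sequences target := by
  simp only [find_min_reverse, find_min_reverse_alt]
  simp only [breakpoints_eq]
  simp only [PySem.List.foldl_append_singleton_eq_map, PySem.List.foldl_append_eq_flatMap]
  rw [sel_fold (fun r => (pv_find_breakpoints r target).length)]
  simp only [List.nil_append]
  have hgen : (List.flatMap (fun s => List.flatMap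
      (fun x_1 =>
        List.map
          (fun y =>
            (PySem.List.slice s none (some (PySem.List.pyGetD (pv_find_breakpoints s target) x_1 0)) ++
               (PySem.List.slice? (PySem.List.slice s (some (PySem.List.pyGetD (pv_find_breakpoints s target) x_1 0))
                   (some (PySem.List.pyGetD (pv_find_breakpoints s target) y 0))) none none (-1)).getD [] ++
               PySem.List.slice s (some (PySem.List.pyGetD (pv_find_breakpoints s target) y 0)),
             (pv_find_breakpoints s target).length - 2 +
               pv_isbp (pv_pos target) ((PySem.List.pyGet? s (PySem.List.pyGetD (pv_find_breakpoints s target) x_1 0 - 1)).getD 0)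
                 ((PySem.List.pyGet? s (PySem.List.pyGetD (pv_find_breakpoints s target) y 0 - 1)).getD 0) +
               pv_isbp (pv_pos target) ((PySem.List.pyGet? s (PySem.List.pyGetD (pv_find_breakpoints s target) x_1 0)).getD 0)
                 ((PySem.List.pyGet? s (PySem.List.pyGetD (pv_find_breakpoints s target) y 0)).getD 0)))
          (PySem.List.pyRange (x_1 + 1) ((pv_find_breakpoints s target).length : Int)))
      (PySem.List.pyRange 0 (((pv_find_breakpoints s target).length : Int) - 1))) sequences)
      = (List.flatMap (fun s => List.flatMap
      (fun x_1 =>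
        List.map
          (fun x_2 => pv_make_reverse s (PySem.List.pyGetD (pv_find_breakpoints s target) x_1 0)
            (PySem.List.pyGetD (pv_find_breakpoints s target) x_2 0))
          (PySem.List.pyRange (x_1 + 1) ((pv_find_breakpoints s target).length : Int)))
      (PySem.List.pyRange 0 (((pv_find_breakpoints s target).length : Int) - 1))) sequences).map
          (fun r => (r, (pv_find_breakpoints r target).length)) := by
    rw [List.map_flatMap]
    exact flatMap_congr_mem _ _ _ (fun s _ => gen_eq target s)
  rw [hgen]
  generalize hg : (List.flatMap _ sequences : List (List Int)) = revs
  clear hg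
  cases revs with
  | nil => simp
  | cons r0 rt =>
    simp only [ite_self, List.nil_append]
    rw [if_neg (by simp)]
    refine Eq.trans ?_ (map_pair_filter (fun r => (pv_find_breakpoints r target).length) _ (r0 :: rt)).symm
    apply List.filter_congr
    intro r hr
    simp only [decide_eq_decide]
    have hm : min target.length ((PySem.List.min?
        (List.map (fun p => p.2) (List.map (fun r => (r, (pv_find_breakpoints r target).length)) (r0 :: rt))) (fun c => c)).getD 0)
        = List.foldl (fun m r => min m (pv_find_breakpoints r target).length) target.length (r0 :: rt) := by
      rw [List.map_map]
      show min target.length ((PySem.List.min?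
        (List.map (fun r => (pv_find_breakpoints r target).length) (r0 :: rt)) (fun c => c)).getD 0) = _
      rw [List.map_cons, PySem.List.min?_id_cons, Option.getD_some, List.foldl_cons, List.foldl_map,
        foldl_min_min]
    rw [hm]

-- ===== VERDICT (by name: the statement is the Claim_ definition above) =====
theorem find_min_reverse_spec : Claim_equal_find_min_reverse := by
  intro sequences target_sequence _dom _pre
  exact find_min_reverse_spec' sequences target_sequence
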